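-- pv_equiv track=rewrite | github.com/MolfarUA/CodeWars_Solutions | 6 kyu/Survivors Ep.4/solution.py | survivors
-- ===== SOURCE A (Python) =====
-- def survivors(list_of_momentum, list_of_powerups):
--     result = list()
--     for i in range(0, len(list_of_momentum)):
--         m = list_of_momentum[i]
--         ok = True
--         for p in list_of_powerups[i]:
--             if m <= 0:
--                 ok = False
--                 break
--             m -= 1
--             m += p
--         if ok and m > 0:
--             result.append(i)
--     return result
-- ===== SOURCE B (Python) =====
-- def survivors(list_of_momentum, list_of_powerups):
--     # Stage 1: for each powerup list compute its survival threshold: the maximum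
--     # prefix deficit max(0, max_k sum_{j<k}(1 - p_j)).  Momentum after k steps is
--     # m - deficit_k, and it must stay > 0 before every step and at the end, so
--     # index i survives iff its momentum strictly exceeds this threshold.
--     thresholds = []
--     for ps in list_of_powerups[:len(list_of_momentum)]:
--         worst = 0
--         run = 0
--         for p in ps:
--             run += 1 - p
--             if run > worst:
--                 worst = run
--         thresholds.append(worst)
--     # Stage 2: one comparison per index, no simulation of the momentum.
--     return [i for i in range(len(thresholds)) if list_of_momentum[i] > thresholds[i]]
-- ===== Notes on version B (the rewrite author's own statement) =====
-- stated objective: alternative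
-- what changed: Instead of simulating the running momentum with an early-exit check per step, B precomputes for each powerup list a single survival threshold (the maximum prefix deficit of the 'lose 1, gain p' steps), then selects index i by the single comparison momentum[i] > threshold[i].
import Mathlib
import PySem

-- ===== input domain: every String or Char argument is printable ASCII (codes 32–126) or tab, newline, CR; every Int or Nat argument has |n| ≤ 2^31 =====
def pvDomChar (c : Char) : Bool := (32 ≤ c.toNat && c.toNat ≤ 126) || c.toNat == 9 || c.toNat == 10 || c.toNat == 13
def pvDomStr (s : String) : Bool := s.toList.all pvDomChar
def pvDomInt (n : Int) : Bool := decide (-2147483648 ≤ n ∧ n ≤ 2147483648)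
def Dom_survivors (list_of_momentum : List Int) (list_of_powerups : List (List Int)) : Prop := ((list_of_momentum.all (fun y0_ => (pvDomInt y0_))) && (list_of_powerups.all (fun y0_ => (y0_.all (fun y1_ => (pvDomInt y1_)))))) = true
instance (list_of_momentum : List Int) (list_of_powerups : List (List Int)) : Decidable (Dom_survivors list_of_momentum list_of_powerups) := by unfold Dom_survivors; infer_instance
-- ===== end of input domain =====

-- B replaces A's per-step momentum simulation with a precomputed per-index survival
-- threshold (maximum prefix deficit of the powerup steps) followed by one comparison.

-- ===== PORT A =====
-- inner 'for p in list_of_powerups[i]' loop of A: returns final m and the ok flag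
def survAinner : List Int → Int → Int × Bool
  | [], m => (m, true)
  | p :: ps, m => if m ≤ 0 then (m, false) else survAinner ps (m - 1 + p)

def survivors (list_of_momentum : List Int) (list_of_powerups : List (List Int)) : List Int :=
  (PySem.List.pyRange 0 (list_of_momentum.length : Int) 1).foldl
    (fun result i =>
      let m := PySem.List.pyGetD list_of_momentum i 0   -- i always in range here
      match PySem.List.pyGet? list_of_powerups i with   -- none = IndexError, excluded by Pre_
      | none => result
      | some ps =>
        let r := survAinner ps m
        if r.2 && decide (0 < r.1) then result ++ [i] else result)
    []

-- ===== PORT B =====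
-- inner loop of Source B: worst = 0; run = 0; for p in ps: run += 1 - p; if run > worst: worst = run
def thrB (ps : List Int) : Int :=
  (ps.foldl (fun st p =>
      let run := st.2 + (1 - p)
      (if run > st.1 then run else st.1, run)) (0, 0)).1

def survivors_alt (list_of_momentum : List Int) (list_of_powerups : List (List Int)) : List Int :=
  -- thresholds list built by the append loop over list_of_powerups[:len(list_of_momentum)]
  let thresholds :=
    (PySem.List.slice list_of_powerups none (some (list_of_momentum.length : Int))).foldl
      (fun acc ps => acc ++ [thrB ps]) []
  -- [i for i in range(len(thresholds)) if list_of_momentum[i] > thresholds[i]]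
  (PySem.List.pyRange 0 (thresholds.length : Int) 1).filter
    (fun i => decide (PySem.List.pyGetD thresholds i 0 < PySem.List.pyGetD list_of_momentum i 0))
    -- indices are always in range here, so pyGetD is exact

-- ===== PRECONDITION & SPEC =====
-- Pre_ excludes exactly the inputs where list_of_powerups is shorter than list_of_momentum,
-- on which Python A raises IndexError at list_of_powerups[i].
def Pre_survivors (list_of_momentum : List Int) (list_of_powerups : List (List Int)) : Prop :=
  list_of_momentum.length ≤ list_of_powerups.length
instance (list_of_momentum : List Int) (list_of_powerups : List (List Int)) : Decidable (Pre_survivors list_of_momentum list_of_powerups) := by unfold Pre_survivors; infer_instance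

def pvWitness_survivors : List Int × List (List Int) := ([2, 1, 0], [[1, 0], [], [3]])

def Spec_survivors (list_of_momentum : List Int) (list_of_powerups : List (List Int)) (out : List Int) : Prop := out = survivors_alt list_of_momentum list_of_powerups
instance (list_of_momentum : List Int) (list_of_powerups : List (List Int)) (out : List Int) : Decidable (Spec_survivors list_of_momentum list_of_powerups out) := by unfold Spec_survivors; infer_instance

-- ===== CLAIM (what is proved, stated in full; the proofs are below) =====
def Claim_equal_survivors : Prop := ∀ (list_of_momentum : List Int) (list_of_powerups : List (List Int)), Dom_survivors list_of_momentum list_of_powerups → Pre_survivors list_of_momentum list_of_powerups → Spec_survivors list_of_momentum list_of_powerups (survivors list_of_momentum list_of_powerups)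

-- ===== LEMMAS AND PROOFS =====

-- survival threshold, recursive characterisation
def needRec : List Int → Int
  | [] => 0
  | p :: ps => max 0 (needRec ps + 1 - p)

theorem needRec_nonneg (ps : List Int) : 0 ≤ needRec ps := by
  cases ps <;> simp [needRec]

theorem thrB_fold (ps : List Int) : ∀ (w r : Int), r ≤ w →
    (ps.foldl (fun st p =>
      let run := st.2 + (1 - p)
      (if run > st.1 then run else st.1, run)) (w, r)).1 = max w (r + needRec ps) := by
  induction ps with
  | nil => intro w r h; simp [needRec]; omega
  | cons p ps ih =>
    intro w r h
    have h0 := needRec_nonneg ps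
    simp only [List.foldl_cons]
    rw [ih]
    · simp only [needRec]
      split_ifs <;> omega
    · split_ifs <;> omega

theorem thrB_eq_needRec (ps : List Int) : thrB ps = needRec ps := by
  have := thrB_fold ps 0 0 le_rfl
  have h0 := needRec_nonneg ps
  simp only [thrB, this]
  omega

-- A's inner loop decides exactly 'momentum exceeds the threshold'
theorem inner_eq_need (ps : List Int) : ∀ m : Int,
    ((survAinner ps m).2 && decide (0 < (survAinner ps m).1)) = decide (needRec ps < m) := by
  induction ps with
  | nil => intro m; simp [survAinner, needRec]
  | cons p ps ih =>
    intro m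
    have h0 := needRec_nonneg ps
    by_cases hm : m ≤ 0
    · simp only [survAinner, if_pos hm, Bool.false_and]
      symm
      simp only [decide_eq_false_iff_not, needRec]
      omega
    · simp only [survAinner, if_neg hm]
      rw [ih]
      simp only [needRec, decide_eq_decide]
      omega

-- shared filter condition
def condN (mom : List Int) (pow : List (List Int)) (i : Int) : Bool :=
  decide (needRec (PySem.List.pyGetD pow i []) < PySem.List.pyGetD mom i 0)

theorem survivors_eq_filter (mom : List Int) (pow : List (List Int))
    (hp : mom.length ≤ pow.length) :
    survivors mom pow
      = (PySem.List.pyRange 0 (mom.length : Int) 1).filter (condN mom pow) := by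
  unfold survivors
  rw [PySem.List.foldl_congr_mem (g := fun result i =>
        if condN mom pow i then result ++ [i] else result)]
  · rw [PySem.List.foldl_append_if_eq_filter]; simp
  · intro result i hi
    rw [PySem.List.mem_pyRange_one] at hi
    obtain ⟨h0, h1⟩ := hi
    have hlt : i.toNat < pow.length := by omega
    rw [PySem.List.pyGet?_eq_some_getElem _ h0 (by omega)]
    have : PySem.List.pyGetD pow i [] = pow[i.toNat] := by
      rw [PySem.List.pyGetD_eq_getElem _ _ h0 (by omega)]
    simp only [condN, this, inner_eq_need]

theorem survivors_alt_eq_filter (mom : List Int) (pow : List (List Int))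
    (hp : mom.length ≤ pow.length) :
    survivors_alt mom pow
      = (PySem.List.pyRange 0 (mom.length : Int) 1).filter (condN mom pow) := by
  unfold survivors_alt
  rw [PySem.List.slice_to_natCast, PySem.List.foldl_append_singleton_eq_map]
  simp only [List.nil_append]
  have hlen : ((pow.take mom.length).map thrB).length = mom.length := by
    simp [List.length_take, Nat.min_eq_left hp]
  rw [hlen]
  apply List.filter_congr
  intro i hi
  rw [PySem.List.mem_pyRange_one] at hi
  obtain ⟨h0, h1⟩ := hi
  have hnat : i.toNat < mom.length := by omega
  unfold condN
  have hthr : PySem.List.pyGetD ((pow.take mom.length).map thrB) i 0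
      = thrB pow[i.toNat] := by
    rw [PySem.List.pyGetD_eq_getElem _ _ h0 (by rw [hlen]; omega)]
    simp [List.getElem_take]
  have hpw : PySem.List.pyGetD pow i [] = pow[i.toNat] := by
    rw [PySem.List.pyGetD_eq_getElem _ _ h0 (by omega)]
  simp only [hthr, hpw, thrB_eq_needRec]

-- ===== VERDICT (by name: the statement is the Claim_ definition above) =====
theorem survivors_spec : Claim_equal_survivors := by
  intro mom pow _ hpre
  unfold Spec_survivors
  rw [survivors_eq_filter mom pow hpre, survivors_alt_eq_filter mom pow hpre]
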